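-- pv_equiv track=rewrite | github.com/tkgaolol/brushcode_juejin | code/96.py | solution
-- ===== SOURCE A (Python) =====
-- def solution(n, data):
--     days = 0
--     data = list(data)  # 将字符串转换为列表以便修改
--     while True:
--         new_data = data[:]  # 复制当前状态
--         changed = False
--
--         for i in range(n):
--             # 检查当前学生与相邻学生的颜色
--             if data[i] == data[(i - 1) % n] == data[(i + 1) % n]:
--                 new_data[i] = '1' if data[i] == '0' else '0'  # 颜色翻转
--                 changed = True
--
--         days += 1
--         data = new_data
--
--         # 如果没有变化，达到稳定状态
--         if not changed:
--             break
--
--         # 如果经过 n 次循环仍未稳定，返回 -1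
--         if days > n:
--             return [-1, -1]
--
--     # 计算“时尚达人”的数量
--     fashionistas = sum(1 for i in range(n) if data[i] != data[(i - 1) % n] and data[i] != data[(i + 1) % n])
--
--     return [days, fashionistas]
-- ===== SOURCE B (Python) =====
-- def solution(n, data):
--     # Run-based day pass: anchor the ring at a colour boundary, decompose it into
--     # maximal runs, flip only the strict interiors of runs (length >= 3), and
--     # rebuild the ring segment by segment; a uniform ring flips wholesale.
--     d = list(data[:n])
--     days = 0
--     while True:
--         days += 1
--         s = next((i for i in range(n) if d[i] != d[i - 1]), None)
--         if s is None:
--             # uniform ring: every cell is interior of the single wrapping run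
--             if n <= 0:
--                 return [days, 0]
--             d = ['1' if c == '0' else '0' for c in d]
--             if days > n:
--                 return [-1, -1]
--             continue
--         rot = d[s:] + d[:s]
--         runs = []
--         rest = rot
--         while rest:
--             k = 1
--             while k < len(rest) and rest[k] == rest[0]:
--                 k += 1
--             runs.append(k)
--             rest = rest[k:]
--         if not any(L >= 3 for L in runs):
--             return [days, sum(1 for L in runs if L == 1)]
--         if days > n:
--             return [-1, -1]
--         new_rot = []
--         rest = rot
--         for L in runs:
--             c = rest[0]
--             if L >= 3:
--                 f = '1' if c == '0' else '0'
--                 new_rot += [c] + [f] * (L - 2) + [c]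
--             else:
--                 new_rot += [c] * L
--             rest = rest[L:]
--         d = new_rot[n - s:] + new_rot[:n - s]
-- ===== Notes on version B (the rewrite author's own statement) =====
-- stated objective: alternative
-- what changed: Each day B anchors the ring at a colour boundary, run-length-encodes the rotated ring into maximal runs, decides change/stability from run lengths (some run >= 3), rebuilds the new state segment-per-run by flipping strict run interiors, and counts fashionistas as the number of length-1 runs, instead of A's per-cell scan that re-tests both modular neighbours of every cell into a copied buffer; a uniform ring (no boundary) is flipped wholesale.
import Mathlib
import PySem

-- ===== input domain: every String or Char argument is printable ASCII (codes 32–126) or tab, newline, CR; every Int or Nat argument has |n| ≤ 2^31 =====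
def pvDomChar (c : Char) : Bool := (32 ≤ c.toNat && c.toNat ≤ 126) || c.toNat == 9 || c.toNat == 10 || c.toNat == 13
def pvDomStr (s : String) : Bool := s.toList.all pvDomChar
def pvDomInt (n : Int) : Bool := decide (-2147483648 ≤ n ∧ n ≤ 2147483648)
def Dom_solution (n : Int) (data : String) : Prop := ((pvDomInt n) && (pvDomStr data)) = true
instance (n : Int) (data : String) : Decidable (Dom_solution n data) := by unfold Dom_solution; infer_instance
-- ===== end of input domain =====

-- B re-implements each day as a run-length pass: anchor the ring at a colour boundary, split into maximal runs, flip strict run interiors and rebuild segment by segment (uniform rings flip wholesale), instead of A's per-cell two-neighbour re-test into a copy; equal return values proved on Pre_ (n ≤ len(data)).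


def pvFlip (c : Char) : Char := if c == '0' then '1' else '0'

-- ===== PORT A =====
def solutionCondA (n : Int) (d : List Char) (i : Int) : Bool :=
  (PySem.List.pyGetD d i ' ' == PySem.List.pyGetD d (PySem.Int.mod (i - 1) n) ' ')
  && (PySem.List.pyGetD d (PySem.Int.mod (i - 1) n) ' ' == PySem.List.pyGetD d (PySem.Int.mod (i + 1) n) ' ')

def solutionPassA (n : Int) (d : List Char) : List Char × Bool :=
  (PySem.List.pyRange 0 n 1).foldl
    (fun st i =>
      if solutionCondA n d i then
        (PySem.List.pySetD st.1 i (pvFlip (PySem.List.pyGetD d i ' ')), true)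
      else st)
    (d, false)

def solutionFashA (n : Int) (d : List Char) : Int :=
  ((PySem.List.pyRange 0 n 1).map (fun i =>
      if (!(PySem.List.pyGetD d i ' ' == PySem.List.pyGetD d (PySem.Int.mod (i - 1) n) ' '))
         && (!(PySem.List.pyGetD d i ' ' == PySem.List.pyGetD d (PySem.Int.mod (i + 1) n) ' '))
      then (1 : Int) else 0)).sum

def solutionLoopA (n : Int) : Nat → Int → List Char → List Int
  | 0, _, _ => []
  | fuel + 1, days, d =>
    let st := solutionPassA n d
    let days' := days + 1
    if st.2 = false then [days', solutionFashA n st.1]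
    else if days' > n then [-1, -1]
    else solutionLoopA n fuel days' st.1

def solution (n : Int) (data : String) : List Int :=
  solutionLoopA n (n.toNat + 2) 0 data.toList

-- ===== PORT B =====
-- run-length encoding of the rotated ring (Source B's inner while loops)
def solutionRunsB : List Char → List Int
  | [] => []
  | c :: t =>
    ((1 + (t.takeWhile (fun x => x == c)).length : Nat) : Int)
      :: solutionRunsB (t.drop (t.takeWhile (fun x => x == c)).length)
termination_by l => l.length
decreasing_by simp

-- one step of Source B's rebuild loop: emit the transformed segment of one run
def solutionRebuildStep (st : List Char × List Char) (L : Int) : List Char × List Char :=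
  let c := PySem.List.pyGetD st.2 0 ' '
  if 3 ≤ L then
    (st.1 ++ ([c] ++ List.replicate (L - 2).toNat (pvFlip c) ++ [c]),
     PySem.List.slice st.2 (some L) none)
  else
    (st.1 ++ List.replicate L.toNat c, PySem.List.slice st.2 (some L) none)

def solutionLoopB (n : Int) : Nat → Int → List Char → List Int
  | 0, _, _ => []
  | fuel + 1, days, d =>
    let days' := days + 1
    match (PySem.List.pyRange 0 n 1).find?
        (fun i => !(PySem.List.pyGetD d i ' ' == PySem.List.pyGetD d (i - 1) ' ')) with
    | none =>
      if n ≤ 0 then [days', 0]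
      else
        let d' := d.map pvFlip
        if days' > n then [-1, -1] else solutionLoopB n fuel days' d'
    | some s =>
      let rot := PySem.List.slice d (some s) none ++ PySem.List.slice d none (some s)
      let runs := solutionRunsB rot
      if !(runs.any (fun L => decide (3 ≤ L))) then
        [days', (runs.map (fun L => if L == 1 then (1 : Int) else 0)).sum]
      else if days' > n then [-1, -1]
      else
        let new_rot := (runs.foldl solutionRebuildStep ([], rot)).1
        solutionLoopB n fuel days'
          (PySem.List.slice new_rot (some (n - s)) none ++ PySem.List.slice new_rot none (some (n - s)))

def solution_alt (n : Int) (data : String) : List Int :=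
  solutionLoopB n (n.toNat + 2) 0 (PySem.List.slice data.toList none (some n))

-- ===== PRECONDITION & SPEC =====
-- Pre_ excludes exactly the inputs with n > len(data), on which the Python A raises IndexError (data[i] for i up to n-1).
def Pre_solution (n : Int) (data : String) : Prop := n ≤ (data.toList.length : Int)
instance (n : Int) (data : String) : Decidable (Pre_solution n data) := by unfold Pre_solution; infer_instance
def pvWitness_solution : Int × String := (3, "010")

def Spec_solution (n : Int) (data : String) (out : List Int) : Prop := out = solution_alt n data
instance (n : Int) (data : String) (out : List Int) : Decidable (Spec_solution n data out) := by unfold Spec_solution; infer_instance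

-- ===== CLAIM (what is proved, stated in full; the proofs are below) =====
def Claim_equal_solution : Prop := ∀ (n : Int) (data : String), Dom_solution n data → Pre_solution n data → Spec_solution n data (solution n data)

-- ===== LEMMAS AND PROOFS =====

-- canonical per-cell flip condition of A's pass
def pvCond (n : Int) (d : List Char) (i : Int) : Bool :=
  (PySem.List.pyGetD d (PySem.Int.mod (i - 1) n) ' ' == PySem.List.pyGetD d i ' ')
  && (PySem.List.pyGetD d i ' ' == PySem.List.pyGetD d (PySem.Int.mod (i + 1) n) ' ')

-- Nat-indexed ring conditions on the truncated buffer t (length = n)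
def pvRing (t : List Char) (j : Nat) : Bool :=
  (t.getD ((j + t.length - 1) % t.length) ' ' == t.getD j ' ')
  && (t.getD j ' ' == t.getD ((j + 1) % t.length) ' ')

def pvFash (t : List Char) (j : Nat) : Bool :=
  (!(t.getD j ' ' == t.getD ((j + t.length - 1) % t.length) ' '))
  && (!(t.getD j ' ' == t.getD ((j + 1) % t.length) ' '))

-- linear (non-wrapping) conditions on the rotated buffer r
def pvLin (r : List Char) (j : Nat) : Bool :=
  decide (1 ≤ j) && decide (j + 1 < r.length)
  && (r.getD (j - 1) ' ' == r.getD j ' ') && (r.getD j ' ' == r.getD (j + 1) ' ')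

def pvIso (r : List Char) (j : Nat) : Bool :=
  (decide (j = 0) || !(r.getD (j - 1) ' ' == r.getD j ' '))
  && (decide (j + 1 = r.length) || !(r.getD j ' ' == r.getD (j + 1) ' '))

-- recursive form of Source B's rebuild loop
def pvRebuildRec : List Int → List Char → List Char
  | [], _ => []
  | L :: rest, seg =>
    (if 3 ≤ L then
       [PySem.List.pyGetD seg 0 ' ']
         ++ List.replicate (L - 2).toNat (pvFlip (PySem.List.pyGetD seg 0 ' '))
         ++ [PySem.List.pyGetD seg 0 ' ']
     else List.replicate L.toNat (PySem.List.pyGetD seg 0 ' '))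
      ++ pvRebuildRec rest (PySem.List.slice seg (some L) none)

theorem pv_mod_small {i n : Int} (h : 0 < n) (h0 : 0 ≤ i) (h1 : i < n) : PySem.Int.mod i n = i := by
  rw [PySem.Int.mod_eq_emod_of_pos h]; exact Int.emod_eq_of_lt h0 h1

theorem pv_mod_neg_one {n : Int} (h : 0 < n) : PySem.Int.mod (-1) n = n - 1 := by
  rw [PySem.Int.mod_eq_emod_of_pos h]
  have h1 : (-1 : Int) % n = (-1 + n * 1) % n := (Int.add_mul_emod_self_left (a := -1) (b := n) (c := 1)).symm
  rw [h1]
  have : -1 + n * 1 = n - 1 := by ring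
  rw [this]
  exact Int.emod_eq_of_lt (by omega) (by omega)

theorem pv_mod_self {n : Int} (h : 0 < n) : PySem.Int.mod n n = 0 := by
  rw [PySem.Int.mod_eq_emod_of_pos h]; exact Int.emod_self

theorem pv_beq_chain (x y z : Char) : ((x == y) && (y == z)) = ((y == x) && (x == z)) := by
  rw [Bool.eq_iff_iff]
  simp only [Bool.and_eq_true, beq_iff_eq]
  constructor <;> rintro ⟨h1, h2⟩ <;> exact ⟨h1.symm, h1.trans h2⟩

theorem pv_condA_eq_pvCond (n : Int) (d : List Char) (i : Int) :
    solutionCondA n d i = pvCond n d i := by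
  unfold solutionCondA pvCond
  exact pv_beq_chain _ _ _

theorem pv_foldl_pair (cond : Int → Bool) (v : Int → Char) (l : List Int) (a : List Char) (b : Bool) :
    (l.foldl (fun st i => if cond i then (PySem.List.pySetD st.1 i (v i), true) else st) (a, b))
      = (l.foldl (fun x i => if cond i then PySem.List.pySetD x i (v i) else x) a, b || l.any cond) := by
  induction l generalizing a b with
  | nil => simp
  | cons j rest ih =>
    simp only [List.foldl_cons, List.any_cons]
    by_cases h : cond j = true
    · simp [h, ih]
    · simp only [h] at *
      simp [ih]

theorem pv_sets_len (cond : Int → Bool) (v : Int → Char) (l : List Int) (d : List Char) :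
    (l.foldl (fun x i => if cond i then PySem.List.pySetD x i (v i) else x) d).length = d.length := by
  induction l generalizing d with
  | nil => rfl
  | cons j rest ih =>
    simp only [List.foldl_cons]
    rw [ih]
    split
    · exact PySem.List.length_pySetD _ _ _
    · rfl

theorem pv_get_setD_ne (a : List Char) {i j : Int} (v : Char) (h0 : 0 ≤ i) (h1 : i < (a.length : Int))
    (hj : 0 ≤ j) (hne : i ≠ j) :
    PySem.List.pyGetD (PySem.List.pySetD a j v) i ' ' = PySem.List.pyGetD a i ' ' := by
  rw [PySem.List.pySetD_of_nonneg _ _ hj]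
  rw [PySem.List.pyGetD_eq_getElem _ _ h0 (by simp; omega),
      PySem.List.pyGetD_eq_getElem _ _ h0 h1]
  rw [List.getElem_set_ne (by omega)]

theorem pv_nochange (cond : Int → Bool) (v : Int → Char) (l : List Int) (d : List Char)
    (h : ∀ i ∈ l, cond i = false) :
    l.foldl (fun x i => if cond i then PySem.List.pySetD x i (v i) else x) d = d := by
  induction l generalizing d with
  | nil => rfl
  | cons j rest ih =>
    have hj := h j (List.mem_cons_self ..)
    simp only [List.foldl_cons, hj, Bool.false_eq_true, if_false]
    exact ih d (fun i hi => h i (List.mem_cons_of_mem _ hi))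

theorem pv_pass_eq (n : Int) (d : List Char) :
    solutionPassA n d
      = ((PySem.List.pyRange 0 n 1).foldl
           (fun x i => if pvCond n d i then PySem.List.pySetD x i (pvFlip (PySem.List.pyGetD d i ' ')) else x) d,
         (PySem.List.pyRange 0 n 1).any (pvCond n d)) := by
  unfold solutionPassA
  have : ∀ i, solutionCondA n d i = pvCond n d i := pv_condA_eq_pvCond n d
  simp only [this]
  rw [pv_foldl_pair (pvCond n d) (fun i => pvFlip (PySem.List.pyGetD d i ' '))]
  simp

-- pointwise value of A's pass fold
theorem pv_get_setD_self (a : List Char) {i : Int} (v : Char) (h0 : 0 ≤ i) (h1 : i < (a.length : Int)) :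
    PySem.List.pyGetD (PySem.List.pySetD a i v) i ' ' = v := by
  rw [PySem.List.pySetD_of_nonneg _ _ h0]
  rw [PySem.List.pyGetD_eq_getElem _ _ h0 (by simp; omega)]
  exact List.getElem_set_self _

theorem pv_fold_get_not_mem (cond : Int → Bool) (v : Int → Char) (l : List Int)
    (hl : ∀ j ∈ l, 0 ≤ j) (a : List Char) (i : Int) (h0 : 0 ≤ i) (h1 : i < (a.length : Int))
    (hi : i ∉ l) :
    PySem.List.pyGetD (l.foldl (fun x j => if cond j then PySem.List.pySetD x j (v j) else x) a) i ' '
      = PySem.List.pyGetD a i ' ' := by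
  induction l generalizing a with
  | nil => rfl
  | cons j rest ih =>
    simp only [List.foldl_cons]
    have hj0 : 0 ≤ j := hl j (List.mem_cons_self ..)
    have hirest : i ∉ rest := fun h => hi (List.mem_cons_of_mem _ h)
    have hij : i ≠ j := fun h => hi (h ▸ List.mem_cons_self ..)
    have hlr : ∀ x ∈ rest, 0 ≤ x := fun x hx => hl x (List.mem_cons_of_mem _ hx)
    cases hc : cond j with
    | true =>
      simp only [if_true]
      rw [ih hlr _ (by rw [PySem.List.length_pySetD]; exact h1) hirest]
      exact pv_get_setD_ne a (v j) h0 h1 hj0 hij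
    | false =>
      simp only [Bool.false_eq_true, if_false]
      exact ih hlr _ h1 hirest

theorem pv_fold_get (cond : Int → Bool) (v : Int → Char) (l : List Int)
    (hnd : l.Nodup) (hl : ∀ j ∈ l, 0 ≤ j) (a : List Char) (i : Int)
    (h0 : 0 ≤ i) (h1 : i < (a.length : Int)) (hi : i ∈ l) :
    PySem.List.pyGetD (l.foldl (fun x j => if cond j then PySem.List.pySetD x j (v j) else x) a) i ' '
      = if cond i then v i else PySem.List.pyGetD a i ' ' := by
  induction l generalizing a with
  | nil => cases hi
  | cons j rest ih =>
    simp only [List.foldl_cons]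
    have hj0 : 0 ≤ j := hl j (List.mem_cons_self ..)
    have hlr : ∀ x ∈ rest, 0 ≤ x := fun x hx => hl x (List.mem_cons_of_mem _ hx)
    by_cases hij : i = j
    · subst hij
      have hirest : i ∉ rest := (List.nodup_cons.mp hnd).1
      cases hc : cond i with
      | true =>
        simp only [if_true]
        rw [pv_fold_get_not_mem cond v rest hlr _ i h0
              (by rw [PySem.List.length_pySetD]; exact h1) hirest]
        exact pv_get_setD_self a (v i) h0 h1
      | false =>
        simp only [Bool.false_eq_true, if_false]
        exact pv_fold_get_not_mem cond v rest hlr _ i h0 h1 hirest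
    · have hirest : i ∈ rest := by
        rcases List.mem_cons.mp hi with h | h
        · exact absurd h hij
        · exact h
      cases hc : cond j with
      | true =>
        simp only [if_true]
        rw [ih (List.Nodup.of_cons hnd) hlr _
              (by rw [PySem.List.length_pySetD]; exact h1) hirest]
        rw [pv_get_setD_ne a (v j) h0 h1 hj0 hij]
      | false =>
        simp only [Bool.false_eq_true, if_false]
        exact ih (List.Nodup.of_cons hnd) hlr _ h1 hirest


theorem pv_any_congr {α : Type} (l : List α) (f g : α → Bool) (h : ∀ x ∈ l, f x = g x) :
    l.any f = l.any g := by
  induction l with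
  | nil => rfl
  | cons a rest ih =>
    simp only [List.any_cons]
    rw [h a (List.mem_cons_self ..), ih (fun x hx => h x (List.mem_cons_of_mem _ hx))]

theorem pv_take_len (n : Int) (d : List Char) (hlen : n ≤ (d.length : Int)) :
    (d.take n.toNat).length = n.toNat := by
  simp [List.length_take]; omega

theorem pv_getD_idx (n : Int) (d : List Char) (hlen : n ≤ (d.length : Int)) (k : Nat)
    (hk : k < n.toNat) :
    (d.take n.toNat).getD k ' ' = PySem.List.pyGetD d (↑k) ' ' := by
  rw [PySem.List.pyGetD_natCast]
  rw [List.getD_eq_getElem _ _ (by rw [pv_take_len n d hlen]; exact hk),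
      List.getD_eq_getElem _ _ (by omega)]
  simp [List.getElem_take]

theorem pv_modL (n : Int) (hn : 0 < n) (k : Nat) (hk : k < n.toNat) :
    PySem.Int.mod ((k : Int) - 1) n = (((k + n.toNat - 1) % n.toNat : Nat) : Int) := by
  cases k with
  | zero =>
    rw [show ((0 : Nat) : Int) - 1 = -1 by omega, pv_mod_neg_one hn]
    rw [Nat.mod_eq_of_lt (by omega)]
    omega
  | succ m =>
    rw [show ((m + 1 : Nat) : Int) - 1 = ((m : Nat) : Int) by omega]
    rw [pv_mod_small hn (by omega) (by omega)]
    rw [show m + 1 + n.toNat - 1 = m + n.toNat by omega, Nat.add_mod_right,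
        Nat.mod_eq_of_lt (by omega)]

theorem pv_modR (n : Int) (hn : 0 < n) (k : Nat) (hk : k < n.toNat) :
    PySem.Int.mod ((k : Int) + 1) n = (((k + 1) % n.toNat : Nat) : Int) := by
  by_cases h : k + 1 < n.toNat
  · rw [show ((k : Nat) : Int) + 1 = ((k + 1 : Nat) : Int) by omega]
    rw [pv_mod_small hn (by omega) (by omega), Nat.mod_eq_of_lt h]
  · have he : k + 1 = n.toNat := by omega
    rw [show ((k : Nat) : Int) + 1 = n by omega, pv_mod_self hn, he, Nat.mod_self]
    rfl

theorem pv_cond_ring (n : Int) (d : List Char) (hn : 0 < n) (hlen : n ≤ (d.length : Int))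
    (k : Nat) (hk : k < n.toNat) :
    pvCond n d (↑k) = pvRing (d.take n.toNat) k := by
  unfold pvCond pvRing
  rw [pv_modL n hn k hk, pv_modR n hn k hk, pv_take_len n d hlen]
  rw [← pv_getD_idx n d hlen ((k + n.toNat - 1) % n.toNat) (Nat.mod_lt _ (by omega)),
      ← pv_getD_idx n d hlen k hk,
      ← pv_getD_idx n d hlen ((k + 1) % n.toNat) (Nat.mod_lt _ (by omega))]

theorem pv_fash_ring (n : Int) (d : List Char) (hn : 0 < n) (hlen : n ≤ (d.length : Int))
    (k : Nat) (hk : k < n.toNat) :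
    ((!(PySem.List.pyGetD d (↑k) ' ' == PySem.List.pyGetD d (PySem.Int.mod ((k : Int) - 1) n) ' '))
      && (!(PySem.List.pyGetD d (↑k) ' ' == PySem.List.pyGetD d (PySem.Int.mod ((k : Int) + 1) n) ' ')))
      = pvFash (d.take n.toNat) k := by
  unfold pvFash
  rw [pv_modL n hn k hk, pv_modR n hn k hk, pv_take_len n d hlen]
  rw [← pv_getD_idx n d hlen ((k + n.toNat - 1) % n.toNat) (Nat.mod_lt _ (by omega)),
      ← pv_getD_idx n d hlen k hk,
      ← pv_getD_idx n d hlen ((k + 1) % n.toNat) (Nat.mod_lt _ (by omega))]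

theorem pv_pyRange (n : Int) : PySem.List.pyRange 0 n 1 = (List.range n.toNat).map (fun k : Nat => (k : Int)) := by
  rw [PySem.List.pyRange_one]
  rw [show (n - 0 : Int) = n by omega]
  apply List.map_congr_left
  intro k _
  omega

theorem pv_anyA (n : Int) (d : List Char) (hn : 0 < n) (hlen : n ≤ (d.length : Int)) :
    (PySem.List.pyRange 0 n 1).any (pvCond n d)
      = (List.range n.toNat).any (fun j => pvRing (d.take n.toNat) j) := by
  rw [pv_pyRange, List.any_map]
  apply pv_any_congr
  intro k hk
  exact pv_cond_ring n d hn hlen k (List.mem_range.mp hk)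

theorem pv_fashA_eq (n : Int) (d : List Char) (hn : 0 < n) (hlen : n ≤ (d.length : Int)) :
    solutionFashA n d
      = ((List.range n.toNat).map (fun j => if pvFash (d.take n.toNat) j then (1 : Int) else 0)).sum := by
  unfold solutionFashA
  rw [pv_pyRange, List.map_map]
  congr 1
  apply List.map_congr_left
  intro k hk
  simp only [Function.comp]
  rw [pv_fash_ring n d hn hlen k (List.mem_range.mp hk)]

theorem pv_newA (n : Int) (d : List Char) (hn : 0 < n) (hlen : n ≤ (d.length : Int)) :
    ((PySem.List.pyRange 0 n 1).foldl
        (fun x i => if pvCond n d i then PySem.List.pySetD x i (pvFlip (PySem.List.pyGetD d i ' ')) else x) d).take n.toNat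
      = (List.range n.toNat).map (fun j =>
          if pvRing (d.take n.toNat) j then pvFlip ((d.take n.toNat).getD j ' ')
          else (d.take n.toNat).getD j ' ') := by
  apply List.ext_getElem
  · simp [List.length_take, pv_sets_len]; omega
  · intro i h1 h2
    have hi' : i < n.toNat := by
      simp [List.length_take, pv_sets_len] at h1; omega
    have hfl : ((PySem.List.pyRange 0 n 1).foldl
        (fun x j => if pvCond n d j then PySem.List.pySetD x j (pvFlip (PySem.List.pyGetD d j ' ')) else x) d).length = d.length :=
      pv_sets_len _ _ _ _
    rw [List.getElem_take, List.getElem_map, List.getElem_range]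
    have hg : ((PySem.List.pyRange 0 n 1).foldl
        (fun x j => if pvCond n d j then PySem.List.pySetD x j (pvFlip (PySem.List.pyGetD d j ' ')) else x) d)[i]'(by rw [hfl]; omega)
        = PySem.List.pyGetD ((PySem.List.pyRange 0 n 1).foldl
            (fun x j => if pvCond n d j then PySem.List.pySetD x j (pvFlip (PySem.List.pyGetD d j ' ')) else x) d) ((i : Nat) : Int) ' ' := by
      rw [PySem.List.pyGetD_eq_getElem _ ' ' (by omega) (by rw [hfl]; omega)]
      simp
    rw [hg]
    rw [pv_fold_get (pvCond n d) (fun j => pvFlip (PySem.List.pyGetD d j ' '))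
          (PySem.List.pyRange 0 n 1) (PySem.List.nodup_pyRange_one _ _)
          (fun j hj => (PySem.List.mem_pyRange_one.mp hj).1) d ((i : Nat) : Int)
          (by omega) (by omega) (PySem.List.mem_pyRange_one.mpr ⟨by omega, by omega⟩)]
    rw [pv_cond_ring n d hn hlen i hi', ← pv_getD_idx n d hlen i hi']


-- ---- run decomposition of the rotated buffer ----

theorem pv_drop_takeWhile (p : Char → Bool) (tl : List Char) :
    tl.drop (tl.takeWhile p).length = tl.dropWhile p := by
  induction tl with
  | nil => rfl
  | cons a t ih =>
    by_cases h : p a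
    · simp [h, ih]
    · simp [h]

theorem pv_run_split (c : Char) (tl : List Char) :
    c :: tl = List.replicate ((tl.takeWhile (fun x => x == c)).length + 1) c
        ++ tl.drop (tl.takeWhile (fun x => x == c)).length := by
  rw [List.replicate_succ, List.cons_append, pv_drop_takeWhile]
  have htw : tl.takeWhile (fun x => x == c) = List.replicate (tl.takeWhile (fun x => x == c)).length c := by
    rw [List.eq_replicate_iff]
    refine ⟨rfl, fun b hb => ?_⟩
    have := List.mem_takeWhile_imp hb
    simpa using this
  conv_lhs => rw [← List.takeWhile_append_dropWhile (p := fun x => x == c) (l := tl)]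
  rw [← htw]

theorem pv_getD_zero_head (l : List Char) (h : l ≠ []) : l.getD 0 ' ' = l.head h := by
  cases l with
  | nil => exact absurd rfl h
  | cons a t => rfl

theorem pv_run_head (c : Char) (tl : List Char) (h : tl.dropWhile (fun x => x == c) ≠ []) :
    (tl.dropWhile (fun x => x == c)).getD 0 ' ' ≠ c := by
  have hh := List.head_dropWhile_not (fun x => x == c) h
  rw [pv_getD_zero_head _ h]
  intro hc
  rw [hc] at hh
  simp at hh

theorem pv_getD_repl_left (c : Char) (L : Nat) (r₂ : List Char) (j : Nat) (hj : j < L) :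
    (List.replicate L c ++ r₂).getD j ' ' = c := by
  rw [List.getD_append _ _ _ j (by simpa using hj)]
  exact List.getD_replicate c hj

theorem pv_getD_repl_right (c : Char) (L : Nat) (r₂ : List Char) (k : Nat) :
    (List.replicate L c ++ r₂).getD (L + k) ' ' = r₂.getD k ' ' := by
  rw [List.getD_append_right _ _ _ _ (by simp)]
  simp

theorem pv_lin_left (m : Nat) (c : Char) (r₂ : List Char)
    (hhead : ∀ _ : r₂ ≠ [], r₂.getD 0 ' ' ≠ c) (j : Nat) (hj : j ≤ m) :
    pvLin (List.replicate (m + 1) c ++ r₂) j = decide (1 ≤ j ∧ j + 2 ≤ m + 1) := by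
  rw [Bool.eq_iff_iff]
  simp only [pvLin, Bool.and_eq_true, decide_eq_true_eq, beq_iff_eq,
    List.length_append, List.length_replicate]
  constructor
  · rintro ⟨⟨⟨h1, h2⟩, h3⟩, h4⟩
    refine ⟨h1, ?_⟩
    by_contra hcon
    have hjm : j = m := by omega
    have hne : r₂ ≠ [] := List.ne_nil_of_length_pos (by omega)
    have hg1 : (List.replicate (m + 1) c ++ r₂).getD j ' ' = c :=
      pv_getD_repl_left c (m + 1) r₂ j (by omega)
    have hg2 : (List.replicate (m + 1) c ++ r₂).getD (j + 1) ' ' = r₂.getD 0 ' ' := by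
      have h := pv_getD_repl_right c (m + 1) r₂ 0
      have e : j + 1 = m + 1 + 0 := by omega
      rw [e]
      exact h
    rw [hg1, hg2] at h4
    exact hhead hne h4.symm
  · rintro ⟨h1, h2⟩
    have hg0 : (List.replicate (m + 1) c ++ r₂).getD (j - 1) ' ' = c :=
      pv_getD_repl_left c (m + 1) r₂ (j - 1) (by omega)
    have hg1 : (List.replicate (m + 1) c ++ r₂).getD j ' ' = c :=
      pv_getD_repl_left c (m + 1) r₂ j (by omega)
    have hg2 : (List.replicate (m + 1) c ++ r₂).getD (j + 1) ' ' = c :=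
      pv_getD_repl_left c (m + 1) r₂ (j + 1) (by omega)
    exact ⟨⟨⟨h1, by omega⟩, by rw [hg0, hg1]⟩, by rw [hg1, hg2]⟩

theorem pv_lin_shift (m : Nat) (c : Char) (r₂ : List Char)
    (hhead : ∀ _ : r₂ ≠ [], r₂.getD 0 ' ' ≠ c) (k : Nat) :
    pvLin (List.replicate (m + 1) c ++ r₂) (m + 1 + k) = pvLin r₂ k := by
  rw [Bool.eq_iff_iff]
  simp only [pvLin, Bool.and_eq_true, decide_eq_true_eq, beq_iff_eq,
    List.length_append, List.length_replicate]
  cases k with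
  | zero =>
    constructor
    · rintro ⟨⟨⟨h1, h2⟩, h3⟩, h4⟩
      have hne : r₂ ≠ [] := by rintro rfl; simp at h2
      have hg1 : (List.replicate (m + 1) c ++ r₂).getD (m + 1 + 0 - 1) ' ' = c :=
        pv_getD_repl_left c (m + 1) r₂ (m + 1 + 0 - 1) (by omega)
      have hg2 : (List.replicate (m + 1) c ++ r₂).getD (m + 1 + 0) ' ' = r₂.getD 0 ' ' := by
        have := pv_getD_repl_right c (m + 1) r₂ 0
        simpa using this
      rw [hg1, hg2] at h3
      exact absurd h3.symm (hhead hne)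
    · rintro ⟨⟨⟨h1, h2⟩, h3⟩, h4⟩
      omega
  | succ k' =>
    have e1 : m + 1 + (k' + 1) - 1 = m + 1 + k' := by omega
    have e2 : m + 1 + (k' + 1) + 1 = m + 1 + (k' + 2) := by omega
    rw [e1, e2, pv_getD_repl_right c (m + 1) r₂ k', pv_getD_repl_right c (m + 1) r₂ (k' + 2)]
    have e3 : (List.replicate (m + 1) c ++ r₂).getD (m + 1 + (k' + 1)) ' ' = r₂.getD (k' + 1) ' ' :=
      pv_getD_repl_right c (m + 1) r₂ (k' + 1)
    rw [e3]
    have e4 : k' + 1 - 1 = k' := by omega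
    rw [e4]
    constructor
    · rintro ⟨⟨⟨h1, h2⟩, h3⟩, h4⟩
      exact ⟨⟨⟨by omega, by omega⟩, h3⟩, h4⟩
    · rintro ⟨⟨⟨h1, h2⟩, h3⟩, h4⟩
      exact ⟨⟨⟨by omega, by omega⟩, h3⟩, h4⟩

theorem pv_iso_left (m : Nat) (c : Char) (r₂ : List Char)
    (hhead : ∀ _ : r₂ ≠ [], r₂.getD 0 ' ' ≠ c) (j : Nat) (hj : j ≤ m) :
    pvIso (List.replicate (m + 1) c ++ r₂) j = decide (j = 0 ∧ m = 0) := by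
  rw [Bool.eq_iff_iff]
  simp only [pvIso, Bool.and_eq_true, Bool.or_eq_true, Bool.not_eq_true', decide_eq_true_eq,
    beq_eq_false_iff_ne, ne_eq, List.length_append, List.length_replicate]
  constructor
  · rintro ⟨hL, hR⟩
    have hj0 : j = 0 := by
      rcases hL with h | h
      · exact h
      · exfalso
        apply h
        rw [pv_getD_repl_left c (m + 1) r₂ (j - 1) (by omega),
            pv_getD_repl_left c (m + 1) r₂ j (by omega)]
    refine ⟨hj0, ?_⟩
    by_contra hm
    rcases hR with h | h
    · omega
    · apply h
      rw [pv_getD_repl_left c (m + 1) r₂ j (by omega),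
          pv_getD_repl_left c (m + 1) r₂ (j + 1) (by omega)]
  · rintro ⟨hj0, hm0⟩
    refine ⟨Or.inl hj0, ?_⟩
    by_cases hr : r₂ = []
    · left
      subst hr
      simp
      omega
    · right
      rw [pv_getD_repl_left c (m + 1) r₂ j (by omega)]
      have hg : (List.replicate (m + 1) c ++ r₂).getD (j + 1) ' ' = r₂.getD 0 ' ' := by
        have h := pv_getD_repl_right c (m + 1) r₂ 0
        have e : j + 1 = m + 1 + 0 := by omega
        rw [e]
        exact h
      rw [hg]
      exact fun hc => hhead hr hc.symm

theorem pv_iso_shift (m : Nat) (c : Char) (r₂ : List Char)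
    (hhead : ∀ _ : r₂ ≠ [], r₂.getD 0 ' ' ≠ c) (k : Nat) (hk : k < r₂.length) :
    pvIso (List.replicate (m + 1) c ++ r₂) (m + 1 + k) = pvIso r₂ k := by
  have hne : r₂ ≠ [] := by rintro rfl; simp at hk
  rw [Bool.eq_iff_iff]
  simp only [pvIso, Bool.and_eq_true, Bool.or_eq_true, Bool.not_eq_true', decide_eq_true_eq,
    beq_eq_false_iff_ne, ne_eq, List.length_append, List.length_replicate]
  cases k with
  | zero =>
    have hg1 : (List.replicate (m + 1) c ++ r₂).getD (m + 1 + 0 - 1) ' ' = c :=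
      pv_getD_repl_left c (m + 1) r₂ (m + 1 + 0 - 1) (by omega)
    have hg2 : (List.replicate (m + 1) c ++ r₂).getD (m + 1 + 0) ' ' = r₂.getD 0 ' ' := by
      have := pv_getD_repl_right c (m + 1) r₂ 0
      simpa using this
    have hg3 : (List.replicate (m + 1) c ++ r₂).getD (m + 1 + 0 + 1) ' ' = r₂.getD 1 ' ' := by
      have := pv_getD_repl_right c (m + 1) r₂ 1
      simpa [Nat.add_assoc] using this
    rw [hg1, hg2, hg3]
    constructor
    · rintro ⟨_, hR⟩
      refine ⟨Or.inl rfl, ?_⟩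
      rcases hR with h | h
      · left; omega
      · right; exact h
    · rintro ⟨_, hR⟩
      refine ⟨Or.inr (fun hc => hhead hne hc.symm), ?_⟩
      rcases hR with h | h
      · left; omega
      · right; exact h
  | succ k' =>
    have e1 : m + 1 + (k' + 1) - 1 = m + 1 + k' := by omega
    have e2 : m + 1 + (k' + 1) + 1 = m + 1 + (k' + 2) := by omega
    rw [e1, e2, pv_getD_repl_right c (m + 1) r₂ k', pv_getD_repl_right c (m + 1) r₂ (k' + 2),
        pv_getD_repl_right c (m + 1) r₂ (k' + 1)]
    have e4 : k' + 1 - 1 = k' := by omega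
    rw [e4]
    constructor
    · rintro ⟨hL, hR⟩
      refine ⟨?_, ?_⟩
      · rcases hL with h | h
        · omega
        · exact Or.inr h
      · rcases hR with h | h
        · left; omega
        · right; exact h
    · rintro ⟨hL, hR⟩
      refine ⟨?_, ?_⟩
      · rcases hL with h | h
        · omega
        · exact Or.inr h
      · rcases hR with h | h
        · left; omega
        · right; exact h

theorem pv_piece_pure (c f' : Char) (m : Nat) :
    (if 2 ≤ m then [c] ++ List.replicate (m - 1) f' ++ [c] else List.replicate (m + 1) c)
      = (List.range (m + 1)).map (fun j => if decide (1 ≤ j ∧ j + 2 ≤ m + 1) then f' else c) := by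
  by_cases h2 : 2 ≤ m
  · rw [if_pos h2]
    apply List.ext_getElem
    · simp; omega
    · intro i h1 h2'
      have hi : i < m + 1 := by simpa using h2'
      rw [List.getElem_map, List.getElem_range]
      simp only [List.append_assoc] at h1 ⊢
      by_cases hi0 : i = 0
      · subst hi0
        simp
      · by_cases him : i = m
        · rw [List.getElem_append_right (by simp; omega), List.getElem_append_right (by simp; omega)]
          rw [if_neg (by simp; omega)]
          simp
        · rw [List.getElem_append_right (by simp; omega), List.getElem_append_left (by simp; omega)]
          rw [if_pos (by simp; omega)]
          simp
  · rw [if_neg h2]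
    apply List.ext_getElem
    · simp
    · intro i h1 h2'
      have hi : i < m + 1 := by simpa using h2'
      rw [List.getElem_map, List.getElem_range, List.getElem_replicate, if_neg (by simp; omega)]

theorem pv_any_window (m : Nat) :
    (List.range (m + 1)).any (fun j => decide (1 ≤ j ∧ j + 2 ≤ m + 1)) = decide (2 ≤ m) := by
  rw [Bool.eq_iff_iff]
  simp only [List.any_eq_true, List.mem_range, decide_eq_true_eq]
  constructor
  · rintro ⟨j, hj, h⟩; omega
  · intro h; exact ⟨1, by omega, by omega⟩

theorem pv_sum_window (m : Nat) :
    ((List.range (m + 1)).map (fun j => if decide (j = 0 ∧ m = 0) then (1 : Int) else 0)).sum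
      = if m = 0 then (1 : Int) else 0 := by
  by_cases hm : m = 0
  · subst hm; simp
  · rw [if_neg hm]
    have h : ∀ j ∈ List.range (m + 1),
        (fun j => if decide (j = 0 ∧ m = 0) then (1 : Int) else 0) j = 0 := by
      intro j hj
      simp [hm]
    rw [List.map_congr_left h, List.map_const']
    simp

theorem pv_runs_cons (c : Char) (tl : List Char) :
    solutionRunsB (c :: tl)
      = ((1 + (tl.takeWhile (fun x => x == c)).length : Nat) : Int)
          :: solutionRunsB (tl.drop (tl.takeWhile (fun x => x == c)).length) := by
  rw [solutionRunsB]

theorem pv_core (r : List Char) :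
    pvRebuildRec (solutionRunsB r) r
      = (List.range r.length).map (fun j => if pvLin r j then pvFlip (r.getD j ' ') else r.getD j ' ')
    ∧ (solutionRunsB r).any (fun L => decide (3 ≤ L))
        = (List.range r.length).any (fun j => pvLin r j)
    ∧ ((solutionRunsB r).map (fun L => if L == 1 then (1 : Int) else 0)).sum
        = ((List.range r.length).map (fun j => if pvIso r j then (1 : Int) else 0)).sum := by
  induction r using solutionRunsB.induct with
  | case1 => simp [solutionRunsB, pvRebuildRec]
  | case2 c tl ih =>
    obtain ⟨ih1, ih2, ih3⟩ := ih
    have hsplit := pv_run_split c tl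
    have hruns := pv_runs_cons c tl
    have hhead : ∀ _ : tl.drop (tl.takeWhile (fun x => x == c)).length ≠ [],
        (tl.drop (tl.takeWhile (fun x => x == c)).length).getD 0 ' ' ≠ c := by
      rw [pv_drop_takeWhile]
      exact fun h => pv_run_head c tl h
    generalize hm : (tl.takeWhile (fun x => x == c)).length = m at *
    generalize hr2 : tl.drop m = r₂ at *
    -- the transformed first-run segment
    have hrebuild : pvRebuildRec (solutionRunsB (c :: tl)) (c :: tl)
        = (if 2 ≤ m then [c] ++ List.replicate (m - 1) (pvFlip c) ++ [c] else List.replicate (m + 1) c)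
          ++ pvRebuildRec (solutionRunsB r₂) r₂ := by
      rw [hruns, pvRebuildRec]
      congr 1
      · rw [PySem.List.pyGetD_zero_cons]
        have e1 : ((3 : Int) ≤ ((1 + m : Nat) : Int)) ↔ 2 ≤ m := by omega
        have e2 : (((1 + m : Nat) : Int) - 2).toNat = m - 1 := by omega
        have e3 : ((1 + m : Nat) : Int).toNat = m + 1 := by omega
        rw [e2, e3]
        by_cases h2 : 2 ≤ m
        · rw [if_pos (e1.mpr h2), if_pos h2]
        · rw [if_neg (fun hc => h2 (e1.mp hc)), if_neg h2]
      · congr 1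
        rw [PySem.List.slice_from_natCast]
        rw [show ((1 + m : Nat)) = (List.replicate (m + 1) c).length by simp; omega]
        rw [hsplit, List.drop_left]
    refine ⟨?_, ?_, ?_⟩
    · rw [hrebuild, ih1, hsplit, List.length_append, List.length_replicate, List.range_add,
          List.map_append, List.map_map]
      congr 1
      · rw [pv_piece_pure c (pvFlip c) m]
        apply List.map_congr_left
        intro j hj
        have hj' : j < m + 1 := List.mem_range.mp hj
        rw [pv_lin_left m c r₂ hhead j (by omega),
            pv_getD_repl_left c (m + 1) r₂ j (by omega)]
      · apply List.map_congr_left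
        intro k hk
        simp only [Function.comp]
        rw [pv_lin_shift m c r₂ hhead k, pv_getD_repl_right c (m + 1) r₂ k]
    · rw [hruns]
      simp only [List.any_cons]
      rw [ih2, hsplit, List.length_append, List.length_replicate, List.range_add,
          List.any_append, List.any_map]
      congr 1
      · have hcg : ∀ j ∈ List.range (m + 1),
            pvLin (List.replicate (m + 1) c ++ r₂) j = decide (1 ≤ j ∧ j + 2 ≤ m + 1) := by
          intro j hj
          exact pv_lin_left m c r₂ hhead j (by have := List.mem_range.mp hj; omega)
        rw [pv_any_congr _ _ _ hcg, pv_any_window m, decide_eq_decide]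
        omega
      · apply pv_any_congr
        intro k hk
        simp only [Function.comp]
        rw [pv_lin_shift m c r₂ hhead k]
    · rw [hruns]
      simp only [List.map_cons, List.sum_cons]
      rw [ih3, hsplit, List.length_append, List.length_replicate, List.range_add,
          List.map_append, List.sum_append, List.map_map]
      congr 1
      · have hcg : ∀ j ∈ List.range (m + 1),
            (fun j => if pvIso (List.replicate (m + 1) c ++ r₂) j then (1 : Int) else 0) j
              = (fun j => if decide (j = 0 ∧ m = 0) then (1 : Int) else 0) j := by
          intro j hj
          simp only
          rw [pv_iso_left m c r₂ hhead j (by have := List.mem_range.mp hj; omega)]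
        rw [List.map_congr_left hcg, pv_sum_window m]
        have e : (((1 + m : Nat) : Int) == 1) = decide (m = 0) := by
          rw [Bool.eq_iff_iff]
          simp only [beq_iff_eq, decide_eq_true_eq]
          omega
        rw [e]
        by_cases hm0 : m = 0
        · rw [if_pos (by simp [hm0]), if_pos hm0]
        · rw [if_neg (by simp [hm0]), if_neg hm0]
      · congr 1
        apply List.map_congr_left
        intro k hk
        simp only [Function.comp]
        rw [pv_iso_shift m c r₂ hhead k (List.mem_range.mp hk)]

theorem pv_foldl_rebuild (runs : List Int) (acc seg : List Char) :
    (runs.foldl solutionRebuildStep (acc, seg)).1 = acc ++ pvRebuildRec runs seg := by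
  induction runs generalizing acc seg with
  | nil => simp [pvRebuildRec]
  | cons L rest ih =>
    simp only [List.foldl_cons, solutionRebuildStep]
    by_cases h3 : 3 ≤ L
    · rw [if_pos h3, ih, pvRebuildRec, if_pos h3, List.append_assoc]
    · rw [if_neg h3, ih, pvRebuildRec, if_neg h3, List.append_assoc]

theorem pv_rot_getD (t : List Char) (s' j : Nat) (hj : j < t.length) :
    (t.rotate s').getD j ' ' = t.getD ((j + s') % t.length) ' ' := by
  rw [List.getD_eq_getElem _ _ (by rw [List.length_rotate]; exact hj), List.getElem_rotate,
      List.getD_eq_getElem _ _ (Nat.mod_lt _ (by omega))]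

theorem pv_mod_shift_prev (N s j : Nat) (hj : 1 ≤ j) :
    ((j + s) % N + N - 1) % N = (j - 1 + s) % N := by
  by_cases hN : 0 < N
  · have e : (j + s) % N + N - 1 = (j + s) % N + (N - 1) := by omega
    rw [e, Nat.mod_add_mod]
    have e2 : j + s + (N - 1) = (j - 1 + s) + N := by omega
    rw [e2, Nat.add_mod_right]
  · have hN0 : N = 0 := by omega
    subst hN0
    omega

theorem pv_mod_shift_next (N s j : Nat) :
    ((j + s) % N + 1) % N = (j + 1 + s) % N := by
  rw [Nat.mod_add_mod]
  congr 1
  omega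

theorem pv_lin_ring (t : List Char) (s' : Nat) (hs : s' < t.length)
    (hanc : t.getD s' ' ' ≠ t.getD ((s' + t.length - 1) % t.length) ' ')
    (j : Nat) (hj : j < t.length) :
    pvLin (t.rotate s') j = pvRing t ((j + s') % t.length) := by
  have hN : 0 < t.length := by omega
  rw [Bool.eq_iff_iff]
  simp only [pvLin, pvRing, Bool.and_eq_true, decide_eq_true_eq, beq_iff_eq, List.length_rotate]
  by_cases hj0 : j = 0
  · subst hj0
    have hi : (0 + s') % t.length = s' := by
      rw [Nat.zero_add, Nat.mod_eq_of_lt hs]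
    rw [hi]
    constructor
    · rintro ⟨⟨⟨h1, _⟩, _⟩, _⟩
      omega
    · rintro ⟨hA, _⟩
      exact absurd hA.symm hanc
  · by_cases hjl : j + 1 < t.length
    · rw [pv_rot_getD t s' (j - 1) (by omega), pv_rot_getD t s' j (by omega),
          pv_rot_getD t s' (j + 1) (by omega),
          pv_mod_shift_prev t.length s' j (by omega), pv_mod_shift_next t.length s' j]
      constructor
      · rintro ⟨⟨⟨_, _⟩, h3⟩, h4⟩
        exact ⟨h3, h4⟩
      · rintro ⟨h3, h4⟩
        exact ⟨⟨⟨by omega, by omega⟩, h3⟩, h4⟩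
    · rw [pv_mod_shift_next t.length s' j]
      have hjN : j + 1 = t.length := by omega
      have hnext : (j + 1 + s') % t.length = s' := by
        rw [hjN, Nat.add_comm, Nat.add_mod_right, Nat.mod_eq_of_lt hs]
      have hcur : (j + s') % t.length = (s' + t.length - 1) % t.length := by
        congr 1
        omega
      rw [hnext, hcur]
      constructor
      · rintro ⟨⟨⟨_, h2⟩, _⟩, _⟩
        omega
      · rintro ⟨_, hB⟩
        exact absurd hB.symm hanc

theorem pv_iso_ring (t : List Char) (s' : Nat) (hs : s' < t.length)
    (hanc : t.getD s' ' ' ≠ t.getD ((s' + t.length - 1) % t.length) ' ')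
    (j : Nat) (hj : j < t.length) :
    pvIso (t.rotate s') j = pvFash t ((j + s') % t.length) := by
  have hN : 0 < t.length := by omega
  have hN2 : 2 ≤ t.length := by
    by_contra hcon
    have h1 : t.length = 1 := by omega
    apply hanc
    have hs0 : s' = 0 := by omega
    rw [hs0, h1]
  rw [Bool.eq_iff_iff]
  simp only [pvIso, pvFash, Bool.and_eq_true, Bool.or_eq_true, Bool.not_eq_true',
    decide_eq_true_eq, beq_eq_false_iff_ne, ne_eq, List.length_rotate]
  by_cases hj0 : j = 0
  · subst hj0
    have hi : (0 + s') % t.length = s' := by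
      rw [Nat.zero_add, Nat.mod_eq_of_lt hs]
    rw [hi, pv_rot_getD t s' 1 (by omega), show 1 + s' = s' + 1 by omega]
    constructor
    · rintro ⟨_, hR⟩
      refine ⟨fun hc => hanc hc, ?_⟩
      rcases hR with h | h
      · omega
      · rw [pv_rot_getD t s' 0 (by omega), hi] at h
        exact fun hc => h hc
    · rintro ⟨_, hR⟩
      refine ⟨Or.inl rfl, Or.inr ?_⟩
      rw [pv_rot_getD t s' 0 (by omega), hi]
      exact fun hc => hR hc
  · by_cases hjl : j + 1 < t.length
    · rw [pv_rot_getD t s' (j - 1) (by omega), pv_rot_getD t s' j (by omega),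
          pv_rot_getD t s' (j + 1) (by omega),
          pv_mod_shift_prev t.length s' j (by omega), pv_mod_shift_next t.length s' j]
      constructor
      · rintro ⟨hL, hR⟩
        refine ⟨?_, ?_⟩
        · rcases hL with h | h
          · omega
          · exact fun hc => h hc.symm
        · rcases hR with h | h
          · omega
          · exact h
      · rintro ⟨hL, hR⟩
        exact ⟨Or.inr (fun hc => hL hc.symm), Or.inr hR⟩
    · have hjN : j + 1 = t.length := by omega
      rw [pv_rot_getD t s' (j - 1) (by omega), pv_rot_getD t s' j (by omega),
          pv_mod_shift_prev t.length s' j (by omega), pv_mod_shift_next t.length s' j]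
      have hnext : (j + 1 + s') % t.length = s' := by
        rw [hjN, Nat.add_comm, Nat.add_mod_right, Nat.mod_eq_of_lt hs]
      have hcur : (j + s') % t.length = (s' + t.length - 1) % t.length := by
        congr 1
        omega
      rw [hnext]
      constructor
      · rintro ⟨hL, _⟩
        refine ⟨?_, ?_⟩
        · rcases hL with h | h
          · omega
          · exact fun hc => h hc.symm
        · rw [hcur]
          exact fun hc => hanc hc.symm
      · rintro ⟨hL, _⟩
        exact ⟨Or.inr (fun hc => hL hc.symm), Or.inl hjN⟩

theorem pv_rot_range (N s : Nat) :
    (List.range N).map (fun j => (j + s) % N) = (List.range N).rotate s := by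
  apply List.ext_getElem
  · simp [List.length_rotate]
  · intro i h1 h2
    rw [List.getElem_map, List.getElem_range, List.getElem_rotate, List.getElem_range]
    congr 1
    simp

theorem pv_any_rot (N s : Nat) (g : Nat → Bool) :
    (List.range N).any (fun j => g ((j + s) % N)) = (List.range N).any g := by
  have h := List.any_map (f := fun j => (j + s) % N) (l := List.range N) (p := g)
  rw [pv_rot_range] at h
  have h2 : (List.range N).any (fun j => g ((j + s) % N)) = ((List.range N).rotate s).any g := h.symm
  rw [h2]
  exact List.Perm.any_eq (List.rotate_perm _ _)

theorem pv_sum_rot (N s : Nat) (g : Nat → Int) :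
    ((List.range N).map (fun j => g ((j + s) % N))).sum = ((List.range N).map g).sum := by
  have h : ((List.range N).map (fun j => (j + s) % N)).map g
      = (List.range N).map (fun j => g ((j + s) % N)) := by
    rw [List.map_map]
    rfl
  rw [← h, pv_rot_range]
  exact List.Perm.sum_eq ((List.rotate_perm _ _).map g)

theorem pv_chain_eq (t : List Char)
    (h : ∀ k, 1 ≤ k → k < t.length → t.getD k ' ' = t.getD (k - 1) ' ') :
    ∀ j, j < t.length → t.getD j ' ' = t.getD 0 ' ' := by
  intro j
  induction j with
  | zero => intro _; rfl
  | succ i ih =>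
    intro hj
    rw [h (i + 1) (by omega) hj]
    simpa using ih (by omega)

theorem pv_ring_all (t : List Char) (hall : ∀ j, j < t.length → t.getD j ' ' = t.getD 0 ' ')
    (j : Nat) (hj : j < t.length) : pvRing t j = true := by
  have hN : 0 < t.length := by omega
  unfold pvRing
  rw [hall j hj, hall _ (Nat.mod_lt _ hN), hall _ (Nat.mod_lt _ hN)]
  simp

theorem pv_map_flip' (t : List Char) :
    (List.range t.length).map (fun j => pvFlip (t.getD j ' ')) = t.map pvFlip := by
  apply List.ext_getElem
  · simp
  · intro i h1 h2
    rw [List.getElem_map, List.getElem_range, List.getElem_map,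
        List.getD_eq_getElem _ _ (by simpa using h1)]

theorem pv_map_flip (t : List Char) (N : Nat) (h : t.length = N) :
    (List.range N).map (fun j => pvFlip (t.getD j ' ')) = t.map pvFlip := by
  subst h
  exact pv_map_flip' t

theorem pv_trivial_A (n : Int) (hn : n ≤ 0) (fuel : Nat) (days : Int) (d : List Char) :
    solutionLoopA n (fuel + 1) days d = [days + 1, 0] := by
  unfold solutionLoopA
  rw [pv_pass_eq]
  simp [PySem.List.pyRange_one_eq_nil hn, solutionFashA]

theorem pv_trivial_B (n : Int) (hn : n ≤ 0) (fuel : Nat) (days : Int) (d : List Char) :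
    solutionLoopB n (fuel + 1) days d = [days + 1, 0] := by
  unfold solutionLoopB
  rw [PySem.List.pyRange_one_eq_nil hn]
  simp [hn]

theorem pv_anchor (n : Int) (d : List Char) (hn : 0 < n) (hlen : n ≤ (d.length : Int)) (s : Int)
    (hs0 : 0 ≤ s) (hs1 : s < n)
    (hps : (!(PySem.List.pyGetD (d.take n.toNat) s ' ' == PySem.List.pyGetD (d.take n.toNat) (s - 1) ' ')) = true) :
    (d.take n.toNat).getD s.toNat ' '
      ≠ (d.take n.toNat).getD ((s.toNat + (d.take n.toNat).length - 1) % (d.take n.toNat).length) ' ' := by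
  have htl := pv_take_len n d hlen
  have hps' : ¬ (PySem.List.pyGetD (d.take n.toNat) s ' ' = PySem.List.pyGetD (d.take n.toNat) (s - 1) ' ') := by
    simpa using hps
  intro hc
  apply hps'
  rw [show s = ((s.toNat : Nat) : Int) by omega, PySem.List.pyGetD_natCast]
  by_cases h1 : 1 ≤ s.toNat
  · rw [show ((s.toNat : Nat) : Int) - 1 = ((s.toNat - 1 : Nat) : Int) by omega, PySem.List.pyGetD_natCast]
    have e : (s.toNat + (d.take n.toNat).length - 1) % (d.take n.toNat).length = s.toNat - 1 := by
      rw [htl]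
      have e2 : s.toNat + n.toNat - 1 = (s.toNat - 1) + n.toNat := by omega
      rw [e2, Nat.add_mod_right, Nat.mod_eq_of_lt (by omega)]
    rw [e] at hc
    exact hc
  · have hs0' : s.toNat = 0 := by omega
    rw [hs0', show ((0 : Nat) : Int) - 1 = -((1 : Nat) : Int) by omega]
    rw [PySem.List.pyGetD_neg_natCast _ 1 ' ' (by omega) (by rw [htl]; omega)]
    have e : (s.toNat + (d.take n.toNat).length - 1) % (d.take n.toNat).length
        = (d.take n.toNat).length - 1 := by
      rw [hs0', Nat.zero_add, Nat.mod_eq_of_lt (by omega)]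
    rw [e] at hc
    rw [hs0'] at hc
    rw [hc, List.getD_eq_getElem _ _ (by omega)]

theorem pv_back (n : Int) (d : List Char) (hn : 0 < n) (hlen : n ≤ (d.length : Int)) (s' : Nat)
    (hs : s' < n.toNat)
    (hanc : (d.take n.toNat).getD s' ' '
      ≠ (d.take n.toNat).getD ((s' + (d.take n.toNat).length - 1) % (d.take n.toNat).length) ' ') :
    ((List.range ((d.take n.toNat).rotate s').length).map
        (fun j => if pvLin ((d.take n.toNat).rotate s') j
                  then pvFlip (((d.take n.toNat).rotate s').getD j ' ')
                  else ((d.take n.toNat).rotate s').getD j ' ')).rotate (n.toNat - s')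
      = ((PySem.List.pyRange 0 n 1).foldl
          (fun x i => if pvCond n d i then PySem.List.pySetD x i (pvFlip (PySem.List.pyGetD d i ' ')) else x) d).take n.toNat := by
  rw [pv_newA n d hn hlen]
  have htl : (d.take n.toNat).length = n.toNat := pv_take_len n d hlen
  apply List.ext_getElem
  · simp [List.length_rotate, htl]
  · intro i h1 h2
    have hi : i < n.toNat := by simpa using h2
    rw [List.getElem_rotate]
    simp only [List.length_map, List.length_range, List.length_rotate, htl]
    rw [List.getElem_map, List.getElem_range, List.getElem_map, List.getElem_range]
    have hjlt : (i + (n.toNat - s')) % n.toNat < n.toNat := Nat.mod_lt _ (by omega)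
    rw [pv_lin_ring (d.take n.toNat) s' (by omega) hanc _ (by omega),
        pv_rot_getD (d.take n.toNat) s' _ (by omega)]
    have hidx : (((i + (n.toNat - s')) % n.toNat) + s') % (d.take n.toNat).length = i := by
      rw [htl, Nat.mod_add_mod]
      have e : i + (n.toNat - s') + s' = i + n.toNat := by omega
      rw [e, Nat.add_mod_right, Nat.mod_eq_of_lt hi]
    rw [hidx]

theorem pv_loopB_none (n : Int) (fuel : Nat) (days : Int) (d : List Char)
    (h : (PySem.List.pyRange 0 n 1).find?
        (fun i => !(PySem.List.pyGetD d i ' ' == PySem.List.pyGetD d (i - 1) ' ')) = none) :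
    solutionLoopB n (fuel + 1) days d =
      if n ≤ 0 then [days + 1, 0]
      else if days + 1 > n then [-1, -1]
      else solutionLoopB n fuel (days + 1) (d.map pvFlip) := by
  conv_lhs => rw [solutionLoopB]
  rw [h]

theorem pv_loopB_some (n : Int) (fuel : Nat) (days : Int) (d : List Char) (s : Int)
    (h : (PySem.List.pyRange 0 n 1).find?
        (fun i => !(PySem.List.pyGetD d i ' ' == PySem.List.pyGetD d (i - 1) ' ')) = some s) :
    solutionLoopB n (fuel + 1) days d =
      (if !((solutionRunsB (PySem.List.slice d (some s) none ++ PySem.List.slice d none (some s))).any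
            (fun L => decide (3 ≤ L))) then
        [days + 1,
          ((solutionRunsB (PySem.List.slice d (some s) none ++ PySem.List.slice d none (some s))).map
              (fun L => if L == 1 then (1 : Int) else 0)).sum]
      else if days + 1 > n then [-1, -1]
      else
        solutionLoopB n fuel (days + 1)
          (PySem.List.slice
              ((solutionRunsB (PySem.List.slice d (some s) none ++ PySem.List.slice d none (some s))).foldl
                  solutionRebuildStep
                  ([], PySem.List.slice d (some s) none ++ PySem.List.slice d none (some s))).1
              (some (n - s)) none ++
            PySem.List.slice
              ((solutionRunsB (PySem.List.slice d (some s) none ++ PySem.List.slice d none (some s))).foldl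
                  solutionRebuildStep
                  ([], PySem.List.slice d (some s) none ++ PySem.List.slice d none (some s))).1
              none (some (n - s)))) := by
  conv_lhs => rw [solutionLoopB]
  rw [h]

theorem pv_main (n : Int) (hn : 0 < n) (fuel : Nat) :
    ∀ (days : Int) (d : List Char), n ≤ (d.length : Int) →
      solutionLoopA n fuel days d = solutionLoopB n fuel days (d.take n.toNat) := by
  induction fuel with
  | zero => intro days d _; rfl
  | succ fuel ih =>
    intro days d hlen
    have htl : (d.take n.toNat).length = n.toNat := pv_take_len n d hlen
    unfold solutionLoopA
    rw [pv_pass_eq]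
    simp only
    cases hfind : (PySem.List.pyRange 0 n 1).find?
        (fun i => !(PySem.List.pyGetD (d.take n.toNat) i ' ' == PySem.List.pyGetD (d.take n.toNat) (i - 1) ' ')) with
    | none =>
      rw [pv_loopB_none n fuel (days) (d.take n.toNat) hfind]
      have hq := List.find?_eq_none.mp hfind
      have hchain : ∀ k, 1 ≤ k → k < (d.take n.toNat).length →
          (d.take n.toNat).getD k ' ' = (d.take n.toNat).getD (k - 1) ' ' := by
        intro k h1 h2
        have hk' : k < n.toNat := by omega
        have hqq := hq (↑k) (PySem.List.mem_pyRange_one.mpr ⟨by omega, by omega⟩)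
        simp only [Bool.not_eq_true', Bool.not_eq_false] at hqq
        have hbe : PySem.List.pyGetD (d.take n.toNat) (↑k) ' '
            = PySem.List.pyGetD (d.take n.toNat) ((k : Int) - 1) ' ' := by
          exact beq_iff_eq.mp (by simpa using hqq)
        rw [show ((k : Nat) : Int) - 1 = ((k - 1 : Nat) : Int) by omega] at hbe
        rw [PySem.List.pyGetD_natCast, PySem.List.pyGetD_natCast] at hbe
        exact hbe
      have hall := pv_chain_eq (d.take n.toNat) hchain
      have hC : (PySem.List.pyRange 0 n 1).any (pvCond n d) = true := by
        rw [pv_anyA n d hn hlen]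
        exact List.any_eq_true.mpr ⟨0, List.mem_range.mpr (by omega),
          pv_ring_all (d.take n.toNat) hall 0 (by omega)⟩
      rw [hC]
      rw [if_neg (by simp : ¬ (true = false)), if_neg (by omega : ¬ n ≤ 0)]
      by_cases hd : days + 1 > n
      · rw [if_pos hd, if_pos hd]
      · rw [if_neg hd, if_neg hd]
        rw [ih (days + 1) _ (by rw [pv_sets_len]; exact hlen)]
        congr 1
        rw [pv_newA n d hn hlen]
        have hcg : ∀ j ∈ List.range n.toNat,
            (fun j => if pvRing (d.take n.toNat) j then pvFlip ((d.take n.toNat).getD j ' ')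
                      else (d.take n.toNat).getD j ' ') j
              = (fun j => pvFlip ((d.take n.toNat).getD j ' ')) j := by
          intro j hj
          simp only
          rw [pv_ring_all (d.take n.toNat) hall j (by rw [htl]; exact List.mem_range.mp hj)]
          simp
        rw [List.map_congr_left hcg, pv_map_flip _ _ htl]
    | some s =>
      rw [pv_loopB_some n fuel (days) (d.take n.toNat) s hfind]
      have hsb := PySem.List.mem_pyRange_one.mp (List.mem_of_find?_eq_some hfind)
      have hps := List.find?_some hfind
      have hscast : s = ((s.toNat : Nat) : Int) := by omega
      have hs' : s.toNat < n.toNat := by omega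
      have hanc := pv_anchor n d hn hlen s hsb.1 hsb.2 hps
      have hrot : PySem.List.slice (d.take n.toNat) (some s) none
            ++ PySem.List.slice (d.take n.toNat) none (some s)
          = (d.take n.toNat).rotate s.toNat := by
        rw [PySem.List.slice_from _ hsb.1, PySem.List.slice_to _ hsb.1,
            List.rotate_eq_drop_append_take (by omega)]
      rw [hrot]
      have hcore := pv_core ((d.take n.toNat).rotate s.toNat)
      have hchg : (solutionRunsB ((d.take n.toNat).rotate s.toNat)).any (fun L => decide (3 ≤ L))
          = (PySem.List.pyRange 0 n 1).any (pvCond n d) := by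
        rw [hcore.2.1, pv_anyA n d hn hlen]
        rw [List.length_rotate, htl]
        have hcg : ∀ j ∈ List.range n.toNat,
            (fun j => pvLin ((d.take n.toNat).rotate s.toNat) j) j
              = (fun j => pvRing (d.take n.toNat) ((j + s.toNat) % n.toNat)) j := by
          intro j hj
          simp only
          rw [pv_lin_ring (d.take n.toNat) s.toNat (by omega) hanc j
                (by rw [htl]; exact List.mem_range.mp hj), htl]
        rw [pv_any_congr _ _ _ hcg, pv_any_rot n.toNat s.toNat (pvRing (d.take n.toNat))]
      by_cases hch : (PySem.List.pyRange 0 n 1).any (pvCond n d) = true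
      · -- changed day
        rw [hch] at hchg ⊢
        rw [if_neg (by simp : ¬ (true = false)), if_neg (by rw [hchg]; simp : ¬ (!(solutionRunsB ((d.take n.toNat).rotate s.toNat)).any (fun L => decide (3 ≤ L))) = true)]
        by_cases hd : days + 1 > n
        · rw [if_pos hd, if_pos hd]
        · rw [if_neg hd, if_neg hd]
          rw [ih (days + 1) _ (by rw [pv_sets_len]; exact hlen)]
          congr 1
          rw [pv_foldl_rebuild _ [] _, List.nil_append, hcore.1]
          have hns : (n - s : Int) = ((n.toNat - s.toNat : Nat) : Int) := by omega
          rw [hns, PySem.List.slice_from_natCast, PySem.List.slice_to_natCast]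
          rw [← List.rotate_eq_drop_append_take
                (by simp [List.length_rotate, htl])]
          rw [pv_back n d hn hlen s.toNat hs' hanc]
      · -- stable day
        have hch' : (PySem.List.pyRange 0 n 1).any (pvCond n d) = false := by
          simpa using hch
        rw [hch'] at hchg ⊢
        rw [if_pos rfl, if_pos (by rw [hchg]; rfl : (!(solutionRunsB ((d.take n.toNat).rotate s.toNat)).any (fun L => decide (3 ≤ L))) = true)]
        congr 1
        · -- A's buffer unchanged
          rw [pv_nochange _ _ _ _ (fun i hi => by
            have := List.any_eq_false.mp hch' i hi
            simpa using this)]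
          -- fashionista counts agree
          rw [pv_fashA_eq n d hn hlen, hcore.2.2]
          rw [List.length_rotate, htl]
          have hcg : ∀ j ∈ List.range n.toNat,
              (fun j => if pvIso ((d.take n.toNat).rotate s.toNat) j then (1 : Int) else 0) j
                = (fun j => if pvFash (d.take n.toNat) ((j + s.toNat) % n.toNat) then (1 : Int) else 0) j := by
            intro j hj
            simp only
            rw [pv_iso_ring (d.take n.toNat) s.toNat (by omega) hanc j
                  (by rw [htl]; exact List.mem_range.mp hj), htl]
          rw [List.map_congr_left hcg, pv_sum_rot n.toNat s.toNat
                (fun j => if pvFash (d.take n.toNat) j then (1 : Int) else 0)]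

-- ===== VERDICT (by name: the statement is the Claim_ definition above) =====
theorem solution_spec : Claim_equal_solution := by
  intro n data _ hpre
  unfold Spec_solution solution solution_alt
  by_cases hn : n ≤ 0
  · rw [show n.toNat + 2 = (n.toNat + 1) + 1 from rfl,
        pv_trivial_A n hn (n.toNat + 1) 0 data.toList,
        pv_trivial_B n hn (n.toNat + 1) 0 _]
  · have hn' : 0 < n := by omega
    rw [PySem.List.slice_to data.toList (by omega)]
    exact pv_main n hn' (n.toNat + 2) 0 data.toList hpre
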